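-- pv_equiv track=rewrite | github.com/Arvind-Kumar5/Bank_Game | game.py | cardSeparator
-- ===== SOURCE A (Python) =====
-- def cardSeparator(whichList):
--     tempCard = ""
--     cardSep = []
--     for cards in whichList:
--
--         if ";" not in cards:
--             tempCard = tempCard + cards
--
--         else:
--             tempList = cards.split(';')
--                 # initialize an empty string
--             tempLine = ""
--
--             # traverse in the string
--             for word in tempList:
--                 tempLine += word
--
--             tempCard = tempCard + tempLine
--             cardSep.append(tempCard)
--             tempCard = ""
--
--     return cardSep
-- ===== SOURCE B (Python) =====
-- def cardSeparator(whichList):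
--     bounds = [i for i, cards in enumerate(whichList) if ';' in cards]
--     out = []
--     prev = 0
--     for b in bounds:
--         out.append(''.join(whichList[prev:b]) + whichList[b].replace(';', ''))
--         prev = b + 1
--     return out
-- ===== Notes on version B (the rewrite author's own statement) =====
-- stated objective: simpler
-- what changed: Replaces A's single pass with a mutable tempCard accumulator and per-card split/concat by first collecting the boundary indices (cards containing ';'), then slicing the list between consecutive boundaries, joining each slice and stripping the boundary card with replace.
import Mathlib
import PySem

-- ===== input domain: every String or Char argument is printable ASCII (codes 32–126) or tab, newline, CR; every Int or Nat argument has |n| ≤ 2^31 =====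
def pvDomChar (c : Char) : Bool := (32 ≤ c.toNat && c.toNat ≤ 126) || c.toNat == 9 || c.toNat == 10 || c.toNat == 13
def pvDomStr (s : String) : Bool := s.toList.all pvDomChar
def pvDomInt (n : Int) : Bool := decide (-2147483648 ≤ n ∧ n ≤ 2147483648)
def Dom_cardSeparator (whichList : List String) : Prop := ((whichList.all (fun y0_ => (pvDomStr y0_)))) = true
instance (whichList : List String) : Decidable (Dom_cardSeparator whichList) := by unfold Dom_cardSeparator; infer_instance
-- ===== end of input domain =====

-- B rebuilds the groups from the boundary indices (cards containing ';') with slices and join/replace,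
-- instead of A's single pass with a running tempCard accumulator; objective: simpler.

-- ===== PORT A =====
-- the separator ";" is nonempty, so Python's cards.split(';') never raises: split? is `some` there and .getD [] is exact
def cardSeparator (whichList : List String) : List String :=
  (whichList.foldl
    (fun (st : String × List String) cards =>
      if PySem.Str.isIn ";" cards = false then
        (st.1 ++ cards, st.2)
      else
        let tempList := (PySem.Str.split? cards ";").getD []
        let tempLine := tempList.foldl (fun tempLine word => tempLine ++ word) ""
        ("", st.2 ++ [st.1 ++ tempLine]))
    ("", [])).2

-- ===== PORT B =====
def cardSeparator_alt (whichList : List String) : List String :=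
  let bounds : List Int :=
    (PySem.List.enumerate whichList 0).foldl
      (fun acc p => if PySem.Str.isIn ";" p.2 = true then acc ++ [p.1] else acc) []
  (bounds.foldl
    (fun (st : List String × Int) b =>
      (st.1 ++ [PySem.Str.join "" (PySem.List.slice whichList (some st.2) (some b)) ++
                PySem.Str.replace (PySem.List.pyGetD whichList b "") ";" ""],
       b + 1))
    ([], (0 : Int))).1

-- ===== PRECONDITION & SPEC =====
def Spec_cardSeparator (whichList : List String) (out : List String) : Prop := out = cardSeparator_alt whichList
instance (whichList : List String) (out : List String) : Decidable (Spec_cardSeparator whichList out) := by unfold Spec_cardSeparator; infer_instance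

-- ===== CLAIM (what is proved, stated in full; the proofs are below) =====
def Claim_equal_cardSeparator : Prop := ∀ (whichList : List String), Dom_cardSeparator whichList → Spec_cardSeparator whichList (cardSeparator whichList)

-- ===== LEMMAS AND PROOFS =====

-- reference function: the groups, one per boundary card, with pending prefix t
def pvStrip (c : String) : String := PySem.Str.replace c ";" ""

def pvGroups : List String → String → List String
  | [], _ => []
  | c :: cs, t =>
    if PySem.Str.isIn ";" c = false then pvGroups cs (t ++ c)
    else (t ++ pvStrip c) :: pvGroups cs ""

theorem pvEmptyToList : ("" : String).toList = [] := rfl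

theorem pvGroups_cons (c : String) (cs : List String) (t : String) :
    pvGroups (c :: cs) t =
      if PySem.Str.isIn ";" c = false then pvGroups cs (t ++ c)
      else (t ++ pvStrip c) :: pvGroups cs "" := rfl

-- two strings with the same character list are equal
theorem pvStrExt (s t : String) (h : s.toList = t.toList) : s = t := by
  rw [← String.ofList_toList (s := s), ← String.ofList_toList (s := t), h]

-- Chars.replace with single-char old ';' and empty new is filter
theorem pvReplaceGo (fuel : Nat) : ∀ (l acc : List Char), l.length ≤ fuel →
    PySem.Chars.replace.go [';'] [] fuel l acc = acc.reverse ++ l.filter (fun c => !(c == ';')) := by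
  induction fuel with
  | zero =>
    intro l acc h
    have hl : l = [] := List.eq_nil_of_length_eq_zero (Nat.le_zero.mp h)
    subst hl
    simp [PySem.Chars.replace.go]
  | succ n ih =>
    intro l acc h
    cases l with
    | nil => simp [PySem.Chars.replace.go]
    | cons c t =>
      simp only [PySem.Chars.replace.go, List.isPrefixOf, List.reverse_nil, List.nil_append, Bool.and_true]
      by_cases hc : c = ';'
      · subst hc
        rw [if_pos (by simp)]
        have hd : List.drop [';'].length (';' :: t) = t := rfl
        rw [hd, ih t acc (by simpa using Nat.le_of_succ_le_succ h)]
        simp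
      · rw [if_neg (by simp; exact fun hh => hc hh.symm)]
        rw [ih t (c :: acc) (by simpa using Nat.le_of_succ_le_succ h)]
        simp [hc]

theorem pvReplaceFilter (l : List Char) :
    PySem.Chars.replace l [';'] [] = l.filter (fun c => !(c == ';')) := by
  have := pvReplaceGo l.length l [] (le_refl _)
  simpa [PySem.Chars.replace] using this

def pvSplitSemi : List Char → List Char → List (List Char)
  | [], cur => [cur.reverse]
  | c :: t, cur => if c = ';' then cur.reverse :: pvSplitSemi t [] else pvSplitSemi t (c :: cur)

theorem pvSplitSemi_cons (c : Char) (t cur : List Char) :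
    pvSplitSemi (c :: t) cur =
      if c = ';' then cur.reverse :: pvSplitSemi t [] else pvSplitSemi t (c :: cur) := rfl

theorem pvSplitGo (fuel : Nat) : ∀ (l cur : List Char) (acc : List (List Char)), l.length ≤ fuel →
    PySem.Chars.splitOn.go [';'] fuel l cur acc = acc.reverse ++ pvSplitSemi l cur := by
  induction fuel with
  | zero =>
    intro l cur acc h
    have hl : l = [] := List.eq_nil_of_length_eq_zero (Nat.le_zero.mp h)
    subst hl
    simp [PySem.Chars.splitOn.go, pvSplitSemi]
  | succ n ih =>
    intro l cur acc h
    cases l with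
    | nil => simp [PySem.Chars.splitOn.go, pvSplitSemi]
    | cons c t =>
      simp only [PySem.Chars.splitOn.go, List.isPrefixOf, Bool.and_true]
      by_cases hc : c = ';'
      · subst hc
        rw [if_pos (by simp)]
        have hd : List.drop [';'].length (';' :: t) = t := rfl
        rw [hd, ih t [] (cur.reverse :: acc) (by simpa using Nat.le_of_succ_le_succ h)]
        rw [pvSplitSemi_cons, if_pos rfl]
        simp
      · rw [if_neg (by simp; exact fun hh => hc hh.symm)]
        rw [pvSplitSemi_cons, if_neg hc]
        exact ih t (c :: cur) acc (by simpa using Nat.le_of_succ_le_succ h)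

theorem pvSplitSemiFlatten (l : List Char) : ∀ (cur : List Char),
    (pvSplitSemi l cur).flatten = cur.reverse ++ l.filter (fun c => !(c == ';')) := by
  induction l with
  | nil => intro cur; simp [pvSplitSemi]
  | cons c t ih =>
    intro cur
    by_cases hc : c = ';'
    · subst hc
      simp [pvSplitSemi, ih]
    · simp [pvSplitSemi, hc, ih]

theorem pvFoldStr (ps : List String) : ∀ (s : String),
    (ps.foldl (fun a w => a ++ w) s).toList = s.toList ++ (ps.map String.toList).flatten := by
  induction ps with
  | nil => intro s; simp
  | cons w ws ih =>
    intro s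
    simp only [List.foldl_cons, List.map_cons, List.flatten_cons]
    rw [ih (s ++ w), String.toList_append, List.append_assoc]

-- A's inner split-then-concat loop equals B's replace
theorem pvStripEq (c : String) :
    ((PySem.Str.split? c ";").getD []).foldl (fun a w => a ++ w) "" = pvStrip c := by
  apply pvStrExt
  have hs := PySem.Str.split?_map c ";"
  have hsep : (";" : String).toList = [';'] := rfl
  rw [hsep] at hs
  cases hsp : PySem.Str.split? c ";" with
  | none => rw [hsp] at hs; simp [PySem.Chars.split?] at hs
  | some ps =>
    rw [hsp] at hs
    simp only [Option.map_some, PySem.Chars.split?, List.isEmpty_cons] at hs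
    replace hs : ps.map String.toList = PySem.Chars.splitOn c.toList [';'] := by
      simpa using hs
    simp only [Option.getD_some]
    rw [pvFoldStr, hs]
    unfold PySem.Chars.splitOn
    rw [pvSplitGo (c.toList.length + 1) c.toList [] [] (by omega)]
    unfold pvStrip
    rw [PySem.Str.toList_replace, hsep, pvEmptyToList, pvReplaceFilter]
    simp [pvSplitSemiFlatten]

-- Chars.join with empty separator is flatten
theorem pvJoinNilFlatten (ls : List (List Char)) : PySem.Chars.join [] ls = ls.flatten := by
  induction ls with
  | nil => simp [PySem.Chars.join_nil]
  | cons p rest ih =>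
    cases rest with
    | nil => simp [PySem.Chars.join_singleton]
    | cons q r =>
      rw [PySem.Chars.join_cons_cons, ih]
      simp

theorem pvJoinNilEmpty : PySem.Str.join "" [] = "" := by
  apply pvStrExt
  rw [PySem.Str.toList_join, pvEmptyToList]
  simp [PySem.Chars.join_nil]

theorem pvJoinSnoc (l : List String) (x : String) :
    PySem.Str.join "" (l ++ [x]) = PySem.Str.join "" l ++ x := by
  apply pvStrExt
  rw [String.toList_append, PySem.Str.toList_join, PySem.Str.toList_join, pvEmptyToList]
  rw [pvJoinNilFlatten, pvJoinNilFlatten]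
  simp

-- A's fold produces the groups
theorem pvLemA (xs : List String) : ∀ (t : String) (acc : List String),
    (xs.foldl
      (fun (st : String × List String) cards =>
        if PySem.Str.isIn ";" cards = false then
          (st.1 ++ cards, st.2)
        else
          let tempList := (PySem.Str.split? cards ";").getD []
          let tempLine := tempList.foldl (fun tempLine word => tempLine ++ word) ""
          ("", st.2 ++ [st.1 ++ tempLine]))
      (t, acc)).2 = acc ++ pvGroups xs t := by
  induction xs with
  | nil => intro t acc; simp [pvGroups]
  | cons c cs ih =>
    intro t acc
    by_cases hc : PySem.Str.isIn ";" c = false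
    · simp only [List.foldl_cons, if_pos hc]
      rw [ih (t ++ c) acc, pvGroups_cons, if_pos hc]
    · simp only [List.foldl_cons, if_neg hc]
      rw [ih "" (acc ++ [t ++ ((PySem.Str.split? c ";").getD []).foldl (fun a w => a ++ w) ""])]
      rw [pvStripEq, pvGroups_cons, if_neg hc]
      simp

-- B's fold over the boundary indices of the suffix produces the groups of the suffix
theorem pvLemB (full : List String) (suf : List String) : ∀ (q p : Nat) (acc : List String),
    p ≤ q → full.drop q = suf →
    ((((PySem.List.enumerate suf (q : Int)).filter (fun pr => PySem.Str.isIn ";" pr.2)).map Prod.fst).foldl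
      (fun (st : List String × Int) b =>
        (st.1 ++ [PySem.Str.join "" (PySem.List.slice full (some st.2) (some b)) ++
                  PySem.Str.replace (PySem.List.pyGetD full b "") ";" ""],
         b + 1))
      (acc, (p : Int))).1
    = acc ++ pvGroups suf (PySem.Str.join "" (PySem.List.slice full (some (p : Int)) (some (q : Int)))) := by
  induction suf with
  | nil =>
    intro q p acc _ _
    simp [PySem.List.enumerate, pvGroups]
  | cons c suf' ih =>
    intro q p acc hpq hdrop
    have hqlen : q < full.length := by
      rcases Nat.lt_or_ge q full.length with h | h
      · exact h
      · rw [List.drop_eq_nil_of_le h] at hdrop; simp at hdrop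
    have hdrop' : full.drop (q + 1) = suf' := by
      have : full.drop (q + 1) = (full.drop q).tail := by
        rw [← List.drop_drop]
        simp
      rw [this, hdrop]
      rfl
    have hget : full[q]? = some c := by
      rw [← List.head?_drop, hdrop]
      rfl
    have hgetD : full.getD q "" = c := by
      simp [List.getD, hget]
    have henum : PySem.List.enumerate (c :: suf') (q : Int) =
        ((q : Int), c) :: PySem.List.enumerate suf' ((q : Int) + 1) := by
      simp [PySem.List.enumerate]
    have hcast : ((q : Int) + 1) = ((q + 1 : Nat) : Int) := by push_cast; ring
    by_cases hc : PySem.Str.isIn ";" c = true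
    · rw [henum]
      rw [List.filter_cons_of_pos (by simpa using hc)]
      simp only [List.map_cons, List.foldl_cons]
      rw [hcast]
      rw [ih (q + 1) (q + 1) _ (le_refl _) hdrop']
      have hslice : PySem.List.slice full (some ((q+1 : Nat) : Int)) (some ((q+1 : Nat) : Int)) = [] := by
        rw [PySem.List.slice_natCast, Nat.sub_self, List.take_zero]
      rw [hslice, pvJoinNilEmpty]
      rw [PySem.List.pyGetD_natCast, hgetD]
      rw [pvGroups_cons, if_neg (by intro hh; rw [hh] at hc; exact Bool.noConfusion hc)]
      unfold pvStrip
      simp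
    · rw [henum]
      rw [List.filter_cons_of_neg (by simpa using hc)]
      rw [hcast]
      rw [ih (q + 1) p _ (by omega) hdrop']
      have hslice : PySem.List.slice full (some (p : Int)) (some ((q+1 : Nat) : Int)) =
          PySem.List.slice full (some (p : Int)) (some (q : Int)) ++ [c] := by
        rw [PySem.List.slice_natCast, PySem.List.slice_natCast]
        have h1 : q + 1 - p = (q - p) + 1 := by omega
        rw [h1, List.take_add_one]
        have h2 : (full.drop p)[q - p]? = some c := by
          rw [List.getElem?_drop]
          have : p + (q - p) = q := by omega
          rw [this, hget]
        rw [h2]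
        rfl
      rw [hslice, pvJoinSnoc, pvGroups_cons, if_pos (by simpa using hc)]

-- ===== VERDICT (by name: the statement is the Claim_ definition above) =====
theorem cardSeparator_spec : Claim_equal_cardSeparator := by
  intro whichList _
  unfold Spec_cardSeparator cardSeparator cardSeparator_alt
  simp only [PySem.List.foldl_append_if, List.nil_append]
  rw [pvLemA]
  simp only [List.nil_append]
  have hB := pvLemB whichList whichList 0 0 [] (le_refl 0) (by simp)
  simp only [Nat.cast_zero, List.nil_append] at hB
  have hslice : PySem.List.slice whichList (some (0 : Int)) (some (0 : Int)) = [] := by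
    have := PySem.List.slice_natCast whichList 0 0
    simpa using this
  rw [hslice, pvJoinNilEmpty] at hB
  rw [hB]
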